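-- pv_equiv track=rewrite | github.com/wykkllkaslma/AI6130-NLP | scripts/evaluate_medrag.py | simple_drug_extractor
-- ===== SOURCE A (Python) =====
-- def simple_drug_extractor(text, drug_list_set=None):
--     """提取文本中提到的药物名称
--
--     使用最长匹配方式在 drug_list_set 中查找药物名。
--     """
--     if not text or not text.strip() or not drug_list_set:
--         return []
--
--     found = []
--     text_lower = text.lower()
--     # 按长度排序药物名，优先匹配较长的名称
--     for drug in sorted(drug_list_set, key=lambda x: -len(x)):
--         if drug in text_lower:
--             found.append(drug)
--     return found
-- ===== SOURCE B (Python) =====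
-- def simple_drug_extractor(text, drug_list_set=None):
--     """Extract mentioned drug names by indexing the text: collect every substring
--     of the lowered text whose length occurs in the drug list into a hash set, so
--     each drug becomes one set lookup instead of a substring scan of the text;
--     then stable-sort the matches by -len."""
--     if not text or not text.strip() or not drug_list_set:
--         return []
--     tl = text.lower()
--     n = len(tl)
--     lengths = {len(d) for d in drug_list_set}
--     subs = set()
--     for L in lengths:
--         for i in range(n - L + 1):
--             subs.add(tl[i:i + L])
--     found = [d for d in drug_list_set if d in subs]
--     found.sort(key=lambda d: -len(d))
--     return found
-- ===== Notes on version B (the rewrite author's own statement) =====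
-- stated objective: alternative
-- what changed: B inverts the matching direction: it indexes the lowered text once by collecting every substring whose length occurs in the drug list into a hash set, so each drug is found by a single set lookup instead of a substring scan of the text, and only the matches are then stably sorted by descending length (A sorts the whole list and scans the text per drug).
import Mathlib
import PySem

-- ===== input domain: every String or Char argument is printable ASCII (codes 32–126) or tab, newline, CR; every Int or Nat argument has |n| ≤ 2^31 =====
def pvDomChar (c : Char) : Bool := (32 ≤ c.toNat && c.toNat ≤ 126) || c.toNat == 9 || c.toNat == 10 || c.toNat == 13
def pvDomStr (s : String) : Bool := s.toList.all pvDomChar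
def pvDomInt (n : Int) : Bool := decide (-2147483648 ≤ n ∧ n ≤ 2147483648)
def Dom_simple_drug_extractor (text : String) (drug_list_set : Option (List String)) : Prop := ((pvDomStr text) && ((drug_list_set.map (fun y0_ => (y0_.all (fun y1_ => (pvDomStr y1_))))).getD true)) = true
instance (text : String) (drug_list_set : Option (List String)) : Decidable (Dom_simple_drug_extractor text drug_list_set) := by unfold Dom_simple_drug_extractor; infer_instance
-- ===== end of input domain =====

-- ===== PORT A =====
-- B indexes the text (set of all its substrings, one lookup per drug) instead of A's
-- per-drug substring scan of the text; return values proved equal.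
def simple_drug_extractor (text : String) (drug_list_set : Option (List String)) : List String :=
  if text = "" ∨ PySem.Str.strip text = "" ∨ drug_list_set = none ∨ drug_list_set = some [] then []
  else
    let text_lower := PySem.Str.lower text
    (PySem.List.sorted (drug_list_set.getD []) (fun x => -(PySem.Str.len x))).foldl
      (fun found drug => if PySem.Str.isIn drug text_lower then found ++ [drug] else found) []

-- ===== PORT B =====
def simple_drug_extractor_alt (text : String) (drug_list_set : Option (List String)) : List String :=
  if text = "" ∨ PySem.Str.strip text = "" ∨ drug_list_set = none ∨ drug_list_set = some [] then []
  else
    let tl := PySem.Str.lower text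
    let n : Int := PySem.Str.len tl
    let lengths : PySem.Set Int :=
      PySem.Set.ofList ((drug_list_set.getD []).map (fun d => PySem.Str.len d))
    let subs : PySem.Set String :=
      lengths.foldl (fun s L =>
        (PySem.List.pyRange 0 (n - L + 1) 1).foldl (fun s i =>
          PySem.Set.add s (PySem.Str.slice tl (some i) (some (i + L)))) s) PySem.Set.empty
    let found := (drug_list_set.getD []).filter (fun d => PySem.Set.contains subs d)
    PySem.List.sorted found (fun d => -(PySem.Str.len d))

-- ===== PRECONDITION & SPEC =====
def Spec_simple_drug_extractor (text : String) (drug_list_set : Option (List String)) (out : List String) : Prop := out = simple_drug_extractor_alt text drug_list_set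
instance (text : String) (drug_list_set : Option (List String)) (out : List String) : Decidable (Spec_simple_drug_extractor text drug_list_set out) := by unfold Spec_simple_drug_extractor; infer_instance

-- ===== CLAIM (what is proved, stated in full; the proofs are below) =====
def Claim_equal_simple_drug_extractor : Prop := ∀ (text : String) (drug_list_set : Option (List String)), Dom_simple_drug_extractor text drug_list_set → Spec_simple_drug_extractor text drug_list_set (simple_drug_extractor text drug_list_set)

-- ===== LEMMAS AND PROOFS =====

-- membership in a fold that Set.adds f of each element
theorem pv_mem_foldl_add {α β : Type} [BEq β] [LawfulBEq β] (f : α → β) (l : List α)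
    (s0 : PySem.Set β) (x : β) :
    x ∈ l.foldl (fun s a => PySem.Set.add s (f a)) s0 ↔ x ∈ s0 ∨ ∃ a ∈ l, x = f a := by
  induction l generalizing s0 with
  | nil => simp
  | cons a l ih =>
    simp only [List.foldl_cons, ih, PySem.Set.mem_add, List.mem_cons]
    constructor
    · rintro ((h | h) | ⟨b, hb, rfl⟩)
      · exact Or.inl h
      · exact Or.inr ⟨a, Or.inl rfl, h⟩
      · exact Or.inr ⟨b, Or.inr hb, rfl⟩
    · rintro (h | ⟨b, (rfl | hb), rfl⟩)
      · exact Or.inl (Or.inl h)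
      · exact Or.inl (Or.inr rfl)
      · exact Or.inr ⟨b, hb, rfl⟩

-- membership in the nested (i,j) fold
theorem pv_mem_foldl_add2 {β : Type} [BEq β] [LawfulBEq β] (g : Int → Int → β)
    (L : List Int) (h : Int → List Int) (s0 : PySem.Set β) (x : β) :
    x ∈ L.foldl (fun s i => (h i).foldl (fun s j => PySem.Set.add s (g i j)) s) s0
      ↔ x ∈ s0 ∨ ∃ i ∈ L, ∃ j ∈ h i, x = g i j := by
  induction L generalizing s0 with
  | nil => simp
  | cons a L ih =>
    simp only [List.foldl_cons, ih, pv_mem_foldl_add (g a) (h a) s0, List.mem_cons]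
    constructor
    · rintro ((h' | h') | ⟨i, hi, hj⟩)
      · exact Or.inl h'
      · exact Or.inr ⟨a, Or.inl rfl, h'⟩
      · exact Or.inr ⟨i, Or.inr hi, hj⟩
    · rintro (h' | ⟨i, (rfl | hi), hj⟩)
      · exact Or.inl (Or.inl h')
      · exact Or.inl (Or.inr hj)
      · exact Or.inr ⟨i, hi, hj⟩

-- a listed drug is in the substring index iff it is a substring of the text
theorem pv_mem_subs_iff_isIn (tl d : String) (drugs : List String) (hd : d ∈ drugs) :
    (d ∈ (PySem.Set.ofList (drugs.map (fun d => PySem.Str.len d))).foldl (fun s L =>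
        (PySem.List.pyRange 0 ((PySem.Str.len tl) - L + 1) 1).foldl (fun s i =>
          PySem.Set.add s (PySem.Str.slice tl (some i) (some (i + L)))) s) PySem.Set.empty)
      ↔ PySem.Str.isIn d tl = true := by
  rw [pv_mem_foldl_add2 (fun L i => PySem.Str.slice tl (some i) (some (i + L))) _ _
      PySem.Set.empty d, PySem.Str.isIn_iff_infix]
  have hlen : PySem.Str.len tl = (tl.toList.length : Int) := by simp [PySem.Str.len]
  have hlend : PySem.Str.len d = (d.toList.length : Int) := by simp [PySem.Str.len]
  constructor
  · rintro (h | ⟨L, hL, i, hi, rfl⟩)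
    · simp [PySem.Set.empty] at h
    · rw [PySem.Set.mem_ofList, List.mem_map] at hL
      rcases hL with ⟨d', _, rfl⟩
      have h0L : 0 ≤ PySem.Str.len d' := by
        rw [show PySem.Str.len d' = ((d'.toList.length : Int)) from by simp [PySem.Str.len]]
        positivity
      rw [PySem.List.mem_pyRange_one] at hi
      have h0i : 0 ≤ i := hi.1
      have htake : (PySem.Str.slice tl (some i) (some (i + PySem.Str.len d'))).toList
          = (tl.toList.drop i.toNat).take ((i + PySem.Str.len d').toNat - i.toNat) := by
        rw [PySem.Str.toList_slice, PySem.Chars.slice_eq_listSlice,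
          PySem.List.slice_toNat tl.toList h0i (by omega)]
      rw [htake]
      exact ((List.take_prefix _ _).isInfix).trans ((List.drop_suffix _ _).isInfix)
  · intro hinf
    rcases hinf with ⟨s, t, hst⟩
    have hsum : s.length + d.toList.length + t.length = tl.toList.length := by
      rw [← hst]; simp; omega
    refine Or.inr ⟨PySem.Str.len d, ?_, (s.length : Int), ?_, ?_⟩
    · rw [PySem.Set.mem_ofList, List.mem_map]
      exact ⟨d, hd, rfl⟩
    · rw [PySem.List.mem_pyRange_one, hlen, hlend]
      omega
    · apply String.ext
      rw [PySem.Str.toList_slice, PySem.Chars.slice_eq_listSlice, hlend,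
        PySem.List.slice_toNat tl.toList (by positivity) (by positivity)]
      have h1 : ((s.length : Int) + (d.toList.length : Int)).toNat - ((s.length : Int)).toNat
          = d.toList.length := by omega
      have h2 : ((s.length : Int)).toNat = s.length := by omega
      rw [h1, h2, ← hst, List.append_assoc, List.drop_left, List.take_left]

-- Set membership test agrees with list membership
theorem pv_contains_iff {β : Type} [BEq β] [LawfulBEq β] (s : PySem.Set β) (x : β) :
    PySem.Set.contains s x = true ↔ x ∈ s := by
  simp [PySem.Set.contains]

-- insertBy places x in front when x's key is strictly smaller than every key in l
theorem pv_insertBy_head {α : Type} (key : α → Int) (x : α) (l : List α)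
    (h : ∀ z ∈ l, key x < key z) :
    PySem.List.insertBy (fun a b => decide (key a < key b)) x l = x :: l := by
  cases l with
  | nil => simp [PySem.List.insertBy]
  | cons y ys => simp [PySem.List.insertBy, h y (by simp)]

-- filtering commutes with insertion into a key-sorted accumulator
theorem pv_filter_insertBy {α : Type} (key : α → Int) (p : α → Bool) (x : α) (acc : List α)
    (hs : acc.Pairwise (fun a b => key a ≤ key b)) :
    (PySem.List.insertBy (fun a b => decide (key a < key b)) x acc).filter p
      = if p x then PySem.List.insertBy (fun a b => decide (key a < key b)) x (acc.filter p)
        else acc.filter p := by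
  induction acc with
  | nil => cases hpx : p x <;> simp [PySem.List.insertBy, hpx]
  | cons y ys ih =>
    rcases List.pairwise_cons.mp hs with ⟨hy, hys⟩
    by_cases hlt : key x < key y
    · have hall : ∀ z ∈ (y :: ys).filter p, key x < key z := by
        intro z hz
        have hz' := List.mem_of_mem_filter hz
        rcases List.mem_cons.mp hz' with rfl | hz''
        · exact hlt
        · exact lt_of_lt_of_le hlt (hy z hz'')
      rw [show PySem.List.insertBy (fun a b => decide (key a < key b)) x (y :: ys)
            = x :: y :: ys by simp [PySem.List.insertBy, hlt]]
      cases hpx : p x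
      · simp [List.filter, hpx]
      · simp only []
        rw [pv_insertBy_head key x _ hall]
        simp [List.filter, hpx]
    · rw [show PySem.List.insertBy (fun a b => decide (key a < key b)) x (y :: ys)
            = y :: PySem.List.insertBy (fun a b => decide (key a < key b)) x ys by
          simp [PySem.List.insertBy, hlt]]
      cases hpy : p y
      · simp only [List.filter, hpy]
        exact ih hys
      · simp only [List.filter, hpy]
        rw [ih hys]
        cases hpx : p x
        · simp
        · simp [PySem.List.insertBy, hlt]

-- the insertion-sort fold commutes with filter
theorem pv_foldl_ins_filter {α : Type} (key : α → Int) (p : α → Bool) (xs : List α) :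
    (xs.filter p).foldl (fun acc x => PySem.List.insertBy (fun a b => decide (key a < key b)) x acc) []
      = (xs.foldl (fun acc x => PySem.List.insertBy (fun a b => decide (key a < key b)) x acc) []).filter p := by
  induction xs using List.reverseRecOn with
  | nil => simp
  | append_singleton ys y ih =>
    have hsorted : (ys.foldl (fun acc x => PySem.List.insertBy (fun a b => decide (key a < key b)) x acc) []).Pairwise (fun a b => key a ≤ key b) := by
      rw [← PySem.List.sorted_eq_foldl_insertBy ys key]
      exact PySem.List.sorted_pairwise ys key
    cases hpy : p y
    · have hfy : List.filter p [y] = [] := by simp [List.filter, hpy]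
      rw [List.filter_append, hfy, List.append_nil, List.foldl_append, ih]
      simp only [List.foldl_cons, List.foldl_nil]
      rw [pv_filter_insertBy key p y _ hsorted, hpy]
      simp
    · have hfy : List.filter p [y] = [y] := by simp [List.filter, hpy]
      rw [List.filter_append, hfy, List.foldl_append, List.foldl_append, ih]
      simp only [List.foldl_cons, List.foldl_nil]
      rw [pv_filter_insertBy key p y _ hsorted, hpy]
      simp

-- the stable sort commutes with filter
theorem pv_sorted_filter {α : Type} (key : α → Int) (p : α → Bool) (xs : List α) :
    PySem.List.sorted (xs.filter p) key = (PySem.List.sorted xs key).filter p := by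
  rw [PySem.List.sorted_eq_foldl_insertBy, PySem.List.sorted_eq_foldl_insertBy]
  exact pv_foldl_ins_filter key p xs

-- ===== VERDICT (by name: the statement is the Claim_ definition above) =====
theorem simple_drug_extractor_spec : Claim_equal_simple_drug_extractor := by
  intro text drug_list_set _
  unfold Spec_simple_drug_extractor simple_drug_extractor simple_drug_extractor_alt
  by_cases hguard : text = "" ∨ PySem.Str.strip text = "" ∨ drug_list_set = none ∨ drug_list_set = some []
  · simp [hguard]
  · simp only [hguard, if_false]
    set tl := PySem.Str.lower text with htl
    have hfilters : (drug_list_set.getD []).filter (fun d =>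
        PySem.Set.contains ((PySem.Set.ofList ((drug_list_set.getD []).map (fun d => PySem.Str.len d))).foldl (fun s L =>
          (PySem.List.pyRange 0 ((PySem.Str.len tl) - L + 1) 1).foldl (fun s i =>
            PySem.Set.add s (PySem.Str.slice tl (some i) (some (i + L)))) s) PySem.Set.empty) d)
        = (drug_list_set.getD []).filter (fun d => PySem.Str.isIn d tl) := by
      apply List.filter_congr
      intro d hd
      rw [Bool.eq_iff_iff, pv_contains_iff]
      exact pv_mem_subs_iff_isIn tl d _ hd
    rw [hfilters]
    rw [PySem.List.foldl_append_if_eq_filter (fun drug => PySem.Str.isIn drug tl)]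
    rw [← pv_sorted_filter (fun d => -(PySem.Str.len d)) (fun d => PySem.Str.isIn d tl)]
    simp
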